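-- pv_equiv track=rewrite | github.com/synth-laboratories/synth-ai | scripts/validate_openapi_pydantic.py | compare_properties
-- ===== SOURCE A (Python) =====
-- from typing import Any
--
-- def compare_properties(
--     openapi_props: dict[str, Any],
--     pydantic_props: dict[str, Any],
--     openapi_required: list[str],
--     pydantic_required: list[str],
--     path: str,
-- ) -> list[str]:
--     """Compare OpenAPI and Pydantic properties, returning list of issues."""
--     issues = []
--
--     all_props = set(openapi_props.keys()) | set(pydantic_props.keys())
--
--     for prop in sorted(all_props):
--         prop_path = f"{path}.{prop}"
--
--         # Check if property exists in both
--         in_openapi = prop in openapi_props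
--         in_pydantic = prop in pydantic_props
--
--         if in_openapi and not in_pydantic:
--             issues.append(f"MISSING IN PYDANTIC: {prop_path}")
--             continue
--         if in_pydantic and not in_openapi:
--             # Allow extra fields in Pydantic (they use extra="allow")
--             pass
--
--         if in_openapi and in_pydantic:
--             # Compare requiredness
--             openapi_req = prop in openapi_required
--             pydantic_req = prop in pydantic_required
--
--             if openapi_req and not pydantic_req:
--                 issues.append(f"REQUIRED MISMATCH: {prop_path} (required in OpenAPI, optional in Pydantic)")
--             elif pydantic_req and not openapi_req:
--                 issues.append(f"REQUIRED MISMATCH: {prop_path} (optional in OpenAPI, required in Pydantic)")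
--
--     return issues
-- ===== SOURCE B (Python) =====
-- def compare_properties(openapi_props, pydantic_props, openapi_required, pydantic_required, path):
--     """Set-algebra decomposition: missing and common key sets first, then one
--     sorted pass over collected (prop, message) pairs."""
--     o = set(openapi_props)
--     p = set(pydantic_props)
--     pairs = [(prop, f"MISSING IN PYDANTIC: {path}.{prop}") for prop in o - p]
--     for prop in o & p:
--         oreq = prop in openapi_required
--         preq = prop in pydantic_required
--         if oreq and not preq:
--             pairs.append((prop, f"REQUIRED MISMATCH: {path}.{prop} (required in OpenAPI, optional in Pydantic)"))
--         elif preq and not oreq: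
--             pairs.append((prop, f"REQUIRED MISMATCH: {path}.{prop} (optional in OpenAPI, required in Pydantic)"))
--     pairs.sort(key=lambda pr: pr[0])
--     return [msg for _, msg in pairs]
-- ===== Notes on version B (the rewrite author's own statement) =====
-- stated objective: alternative
-- what changed: B computes the key-set difference and intersection first, collects (prop, message) pairs unordered, and does a single sort of the collected pairs at the end, instead of A's sorted iteration over the union with per-property membership case analysis.
import Mathlib
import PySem

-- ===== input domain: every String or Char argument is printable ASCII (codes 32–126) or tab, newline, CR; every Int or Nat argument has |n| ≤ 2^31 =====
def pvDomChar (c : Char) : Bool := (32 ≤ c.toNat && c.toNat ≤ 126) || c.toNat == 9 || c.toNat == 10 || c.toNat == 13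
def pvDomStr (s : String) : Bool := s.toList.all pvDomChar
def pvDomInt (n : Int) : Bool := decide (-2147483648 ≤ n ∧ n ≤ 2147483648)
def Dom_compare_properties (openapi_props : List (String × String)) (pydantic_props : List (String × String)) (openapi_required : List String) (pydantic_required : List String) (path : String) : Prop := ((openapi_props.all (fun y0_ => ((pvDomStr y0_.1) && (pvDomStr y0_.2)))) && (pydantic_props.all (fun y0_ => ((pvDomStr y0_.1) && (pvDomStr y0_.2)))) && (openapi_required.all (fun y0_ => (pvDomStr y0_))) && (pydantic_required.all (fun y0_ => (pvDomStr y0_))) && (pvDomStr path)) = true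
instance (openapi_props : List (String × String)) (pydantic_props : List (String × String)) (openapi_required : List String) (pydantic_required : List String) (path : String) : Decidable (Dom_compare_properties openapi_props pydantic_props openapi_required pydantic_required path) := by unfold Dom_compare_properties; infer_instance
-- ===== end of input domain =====

-- B replaces A's sorted union iteration by set difference/intersection plus one final sort of (prop, message) pairs (same cost class: alternative decomposition).

-- ===== PORT A =====
def compare_properties (openapi_props : List (String × String)) (pydantic_props : List (String × String)) (openapi_required : List String) (pydantic_required : List String) (path : String) : List String :=
  let okeys := openapi_props.map Prod.fst
  let pkeys := pydantic_props.map Prod.fst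
  let all_props : PySem.Set String := PySem.Set.union (PySem.Set.ofList okeys) pkeys
  (PySem.List.sorted all_props (fun x => x) false).foldl (fun issues prop =>
    let prop_path := path ++ "." ++ prop
    let in_openapi := okeys.contains prop
    let in_pydantic := pkeys.contains prop
    if in_openapi && !in_pydantic then
      issues ++ ["MISSING IN PYDANTIC: " ++ prop_path]
    else if in_openapi && in_pydantic then
      let openapi_req := openapi_required.contains prop
      let pydantic_req := pydantic_required.contains prop
      if openapi_req && !pydantic_req then
        issues ++ ["REQUIRED MISMATCH: " ++ prop_path ++ " (required in OpenAPI, optional in Pydantic)"]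
      else if pydantic_req && !openapi_req then
        issues ++ ["REQUIRED MISMATCH: " ++ prop_path ++ " (optional in OpenAPI, required in Pydantic)"]
      else issues
    else issues) []

-- ===== PORT B =====
def compare_properties_alt (openapi_props : List (String × String)) (pydantic_props : List (String × String)) (openapi_required : List String) (pydantic_required : List String) (path : String) : List String :=
  let o : PySem.Set String := PySem.Set.ofList (openapi_props.map Prod.fst)
  let p : PySem.Set String := PySem.Set.ofList (pydantic_props.map Prod.fst)
  let pairs0 := (PySem.Set.diff o p).map (fun prop => (prop, "MISSING IN PYDANTIC: " ++ path ++ "." ++ prop))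
  let pairs := (PySem.Set.inter o p).foldl (fun acc prop =>
    let oreq := openapi_required.contains prop
    let preq := pydantic_required.contains prop
    if oreq && !preq then
      acc ++ [(prop, "REQUIRED MISMATCH: " ++ path ++ "." ++ prop ++ " (required in OpenAPI, optional in Pydantic)")]
    else if preq && !oreq then
      acc ++ [(prop, "REQUIRED MISMATCH: " ++ path ++ "." ++ prop ++ " (optional in OpenAPI, required in Pydantic)")]
    else acc) pairs0
  (PySem.List.sorted pairs (fun pr => pr.1) false).map (fun pr => pr.2)

-- ===== PRECONDITION & SPEC =====
def Spec_compare_properties (openapi_props : List (String × String)) (pydantic_props : List (String × String)) (openapi_required : List String) (pydantic_required : List String) (path : String) (out : List String) : Prop := out = compare_properties_alt openapi_props pydantic_props openapi_required pydantic_required path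
instance (openapi_props : List (String × String)) (pydantic_props : List (String × String)) (openapi_required : List String) (pydantic_required : List String) (path : String) (out : List String) : Decidable (Spec_compare_properties openapi_props pydantic_props openapi_required pydantic_required path out) := by unfold Spec_compare_properties; infer_instance

-- ===== CLAIM (what is proved, stated in full; the proofs are below) =====
def Claim_equal_compare_properties : Prop := ∀ (openapi_props : List (String × String)) (pydantic_props : List (String × String)) (openapi_required : List String) (pydantic_required : List String) (path : String), Dom_compare_properties openapi_props pydantic_props openapi_required pydantic_required path → Spec_compare_properties openapi_props pydantic_props openapi_required pydantic_required path (compare_properties openapi_props pydantic_props openapi_required pydantic_required path)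

-- ===== LEMMAS AND PROOFS =====

-- the message A emits for a given property (none = no issue)
def pvMsg? (okeys pkeys openapi_required pydantic_required : List String) (path : String) (prop : String) : Option String :=
  if okeys.contains prop && !pkeys.contains prop then
    some ("MISSING IN PYDANTIC: " ++ path ++ "." ++ prop)
  else if okeys.contains prop && pkeys.contains prop then
    (if openapi_required.contains prop && !pydantic_required.contains prop then
       some ("REQUIRED MISMATCH: " ++ path ++ "." ++ prop ++ " (required in OpenAPI, optional in Pydantic)")
     else if pydantic_required.contains prop && !openapi_required.contains prop then
       some ("REQUIRED MISMATCH: " ++ path ++ "." ++ prop ++ " (optional in OpenAPI, required in Pydantic)")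
     else none)
  else none

-- the mismatch-only message (for properties present on both sides)
def pvMis? (openapi_required pydantic_required : List String) (path : String) (prop : String) : Option String :=
  if openapi_required.contains prop && !pydantic_required.contains prop then
    some ("REQUIRED MISMATCH: " ++ path ++ "." ++ prop ++ " (required in OpenAPI, optional in Pydantic)")
  else if pydantic_required.contains prop && !openapi_required.contains prop then
    some ("REQUIRED MISMATCH: " ++ path ++ "." ++ prop ++ " (optional in OpenAPI, required in Pydantic)")
  else none

-- B's unsorted pair list, written with diff/inter explicitly
def pvPairs (a b oreq preq : List String) (path : String) : List (String × String) :=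
  (PySem.Set.diff (PySem.Set.ofList a) (PySem.Set.ofList b)).map
      (fun prop => (prop, "MISSING IN PYDANTIC: " ++ path ++ "." ++ prop))
    ++ (PySem.Set.inter (PySem.Set.ofList a) (PySem.Set.ofList b)).filterMap
      (fun prop => (pvMis? oreq preq path prop).map (fun m => (prop, m)))

-- A's message paired with its property
def pvG (a b oreq preq : List String) (path : String) (prop : String) : Option (String × String) :=
  (pvMsg? a b oreq preq path prop).map (fun m => (prop, m))

lemma pvFoldl_filterMap {A B : Type} (f : A → Option B) (body : List B → A → List B)
    (h : ∀ acc x, body acc x = acc ++ (f x).toList) :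
    ∀ (l : List A) (acc : List B), l.foldl body acc = acc ++ l.filterMap f := by
  intro l
  induction l with
  | nil => simp
  | cons x t ih =>
    intro acc
    simp only [List.foldl_cons, List.filterMap_cons, h]
    cases f x <;> simp [ih]

lemma pvFilterMap_eq_map {A B : Type} (f : A → Option B) (g : A → B) (l : List A)
    (h : ∀ x ∈ l, f x = some (g x)) : l.filterMap f = l.map g := by
  induction l with
  | nil => rfl
  | cons x t ih =>
    simp only [List.filterMap_cons, h x (by simp), List.map_cons]
    rw [ih (fun y hy => h y (by simp [hy]))]

lemma pvFilterMap_congr {A B : Type} (f g : A → Option B) (l : List A)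
    (h : ∀ x ∈ l, f x = g x) : l.filterMap f = l.filterMap g := by
  induction l with
  | nil => rfl
  | cons x t ih =>
    simp only [List.filterMap_cons, h x (by simp)]
    rw [ih (fun y hy => h y (by simp [hy]))]

-- pvMsg? on the three membership regions
lemma pvMsg_of_not_left {a b oreq preq : List String} {path p : String} (hp : p ∉ a) :
    pvMsg? a b oreq preq path p = none := by
  simp [pvMsg?, hp]

lemma pvG_of_missing {a b oreq preq : List String} {path p : String} (hpa : p ∈ a) (hpb : p ∉ b) :
    pvG a b oreq preq path p = some (p, "MISSING IN PYDANTIC: " ++ path ++ "." ++ p) := by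
  simp [pvG, pvMsg?, hpa, hpb]

lemma pvG_of_common {a b oreq preq : List String} {path p : String} (hpa : p ∈ a) (hpb : p ∈ b) :
    pvG a b oreq preq path p = (pvMis? oreq preq path p).map (fun m => (p, m)) := by
  simp only [pvG, pvMsg?, pvMis?, List.elem_eq_contains.symm, List.elem_eq_mem]
  simp [hpa, hpb]

-- the central fact: B's sorted pair list equals A's sorted union filtered through pvG
lemma pvSorted_pairs (a b oreq preq : List String) (path : String) :
    PySem.List.sorted (pvPairs a b oreq preq path) (fun pr => pr.1)
      = (PySem.List.sorted (PySem.Set.ofList (a ++ b)) (fun x => x)).filterMap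
          (pvG a b oreq preq path) := by
  apply PySem.List.sorted_eq_of_perm_of_pairwise_lt
  · -- permutation
    have h1 : ((PySem.List.sorted (PySem.Set.ofList (a ++ b)) (fun x => x)).filterMap
        (pvG a b oreq preq path)).Perm
        ((PySem.Set.ofList (a ++ b)).filterMap (pvG a b oreq preq path)) :=
      List.Perm.filterMap _ (PySem.List.sorted_perm _ _ _)
    have h2 : PySem.Set.ofList (a ++ b)
        = PySem.Set.ofList a
          ++ (PySem.Set.ofList b).filter (fun y => !((PySem.Set.ofList a).contains y)) := by
      rw [PySem.Set.ofList_append, PySem.Set.update_eq_append_filter]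
    have h3 : ((PySem.Set.ofList b).filter
        (fun y => !((PySem.Set.ofList a).contains y))).filterMap (pvG a b oreq preq path) = [] := by
      rw [List.filterMap_eq_nil_iff]
      intro x hx
      rw [List.mem_filter] at hx
      have hxa : x ∉ a := by
        have := hx.2
        simp only [Bool.not_eq_eq_eq_not, Bool.not_true, PySem.Set.contains_eq_listContains] at this
        intro hmem
        rw [List.contains_eq_mem] at this
        simp [PySem.Set.mem_ofList, hmem] at this
      simp [pvG, pvMsg_of_not_left hxa]
    have h4 : ((PySem.Set.ofList a).filterMap (pvG a b oreq preq path)).Perm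
        (pvPairs a b oreq preq path) := by
      have hfp := List.filter_append_perm (fun x => (PySem.Set.ofList b).contains x)
        (PySem.Set.ofList a)
      have h5 := (List.Perm.filterMap (pvG a b oreq preq path) hfp).symm
      rw [List.filterMap_append] at h5
      have hinter : ((PySem.Set.ofList a).filter
          (fun x => (PySem.Set.ofList b).contains x)).filterMap (pvG a b oreq preq path)
          = (PySem.Set.inter (PySem.Set.ofList a) (PySem.Set.ofList b)).filterMap
              (fun prop => (pvMis? oreq preq path prop).map (fun m => (prop, m))) := by
        apply pvFilterMap_congr
        intro x hx
        rw [List.mem_filter] at hx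
        have hxa : x ∈ a := (PySem.Set.mem_ofList _ _).1 hx.1
        have hxb : x ∈ b := by
          have := hx.2
          simp only [PySem.Set.contains_eq_listContains, List.contains_eq_mem, decide_eq_true_eq,
            PySem.Set.mem_ofList] at this
          exact this
        exact pvG_of_common hxa hxb
      have hdiff : ((PySem.Set.ofList a).filter
          (fun x => !(PySem.Set.ofList b).contains x)).filterMap (pvG a b oreq preq path)
          = (PySem.Set.diff (PySem.Set.ofList a) (PySem.Set.ofList b)).map
              (fun prop => (prop, "MISSING IN PYDANTIC: " ++ path ++ "." ++ prop)) := by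
        apply pvFilterMap_eq_map
        intro x hx
        rw [List.mem_filter] at hx
        have hxa : x ∈ a := (PySem.Set.mem_ofList _ _).1 hx.1
        have hxb : x ∉ b := by
          have := hx.2
          simp only [Bool.not_eq_eq_eq_not, Bool.not_true, PySem.Set.contains_eq_listContains] at this
          intro hmem
          rw [List.contains_eq_mem] at this
          simp [PySem.Set.mem_ofList, hmem] at this
        exact pvG_of_missing hxa hxb
      rw [hinter, hdiff] at h5
      exact h5.trans List.perm_append_comm
    have h6 : (PySem.Set.ofList (a ++ b)).filterMap (pvG a b oreq preq path)
        = (PySem.Set.ofList a).filterMap (pvG a b oreq preq path) := by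
      rw [h2, List.filterMap_append, h3, List.append_nil]
    rw [h6] at h1
    exact h1.trans h4
  · -- strictly increasing first components
    refine List.pairwise_filterMap.mpr ?_
    refine (PySem.List.sorted_ofList_pairwise_lt (a ++ b)).imp ?_
    intro x y hxy u hu v hv
    have hux : u.1 = x := by
      simp only [pvG, Option.map_eq_some_iff] at hu
      obtain ⟨m, _, rfl⟩ := hu
      rfl
    have hvy : v.1 = y := by
      simp only [pvG, Option.map_eq_some_iff] at hv
      obtain ⟨m, _, rfl⟩ := hv
      rfl
    rw [hux, hvy]
    exact hxy

theorem compare_properties_spec : Claim_equal_compare_properties := by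
  intro op pp oreq preq path _
  unfold Spec_compare_properties compare_properties compare_properties_alt
  dsimp only
  rw [pvFoldl_filterMap (pvMsg? (op.map Prod.fst) (pp.map Prod.fst) oreq preq path)
    _ (by
      intro acc x
      simp only [pvMsg?]
      split_ifs <;> simp [String.append_assoc])]
  rw [pvFoldl_filterMap (fun prop => (pvMis? oreq preq path prop).map (fun m => (prop, m)))
    _ (by
      intro acc x
      simp only [pvMis?]
      split_ifs <;> simp [String.append_assoc])]
  rw [show PySem.Set.union (PySem.Set.ofList (op.map Prod.fst)) (pp.map Prod.fst)
      = PySem.Set.ofList (op.map Prod.fst ++ pp.map Prod.fst) from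
    (PySem.Set.ofList_append _ _).symm]
  rw [show ((PySem.Set.diff (PySem.Set.ofList (op.map Prod.fst)) (PySem.Set.ofList (pp.map Prod.fst))).map
        (fun prop => (prop, "MISSING IN PYDANTIC: " ++ path ++ "." ++ prop))
      ++ (PySem.Set.inter (PySem.Set.ofList (op.map Prod.fst)) (PySem.Set.ofList (pp.map Prod.fst))).filterMap
        (fun prop => (pvMis? oreq preq path prop).map (fun m => (prop, m))))
      = pvPairs (op.map Prod.fst) (pp.map Prod.fst) oreq preq path from rfl]
  rw [pvSorted_pairs]
  rw [List.map_filterMap]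
  simp [pvG, Option.map_map, Function.comp_def]
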